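-- pv_equiv track=rewrite | github.com/thresher-sh/thresher | src/threat_scanner/agents/analyst.py | _limit_init_files
-- ===== SOURCE A (Python) =====
-- MAX_INIT_FILES = 20
--
-- def _limit_init_files(paths: set[str]) -> set[str]:
--     """Limit __init__.py files to package roots (shallowest paths) to avoid noise."""
--     init_files = sorted(
--         [p for p in paths if p.endswith("__init__.py")],
--         key=lambda p: p.count("/"),
--     )
--     non_init = {p for p in paths if not p.endswith("__init__.py")}
--
--     limited_inits = set(init_files[:MAX_INIT_FILES])
--     return non_init | limited_inits
-- ===== SOURCE B (Python) =====
-- MAX_INIT_FILES = 20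
--
-- def _limit_init_files(paths):
--     """Bucket __init__.py files by depth in one pass; concatenate buckets in
--     ascending depth (sorting only the distinct depths) and keep the first 20."""
--     non_init = set()
--     buckets = {}
--     for p in paths:
--         if p.endswith("__init__.py"):
--             buckets.setdefault(p.count("/"), []).append(p)
--         else:
--             non_init.add(p)
--     picked = []
--     for depth in sorted(buckets):
--         picked += buckets[depth]
--     return non_init | set(picked[:MAX_INIT_FILES])
-- ===== Notes on version B (the rewrite author's own statement) =====
-- stated objective: alternative
-- what changed: Replaces filter-then-comparison-sort of all __init__.py paths with a single bucketing pass keyed by depth (splitting init/non-init at the same time), then concatenates buckets in ascending depth sorting only the distinct depths before truncating to 20.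
import Mathlib
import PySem

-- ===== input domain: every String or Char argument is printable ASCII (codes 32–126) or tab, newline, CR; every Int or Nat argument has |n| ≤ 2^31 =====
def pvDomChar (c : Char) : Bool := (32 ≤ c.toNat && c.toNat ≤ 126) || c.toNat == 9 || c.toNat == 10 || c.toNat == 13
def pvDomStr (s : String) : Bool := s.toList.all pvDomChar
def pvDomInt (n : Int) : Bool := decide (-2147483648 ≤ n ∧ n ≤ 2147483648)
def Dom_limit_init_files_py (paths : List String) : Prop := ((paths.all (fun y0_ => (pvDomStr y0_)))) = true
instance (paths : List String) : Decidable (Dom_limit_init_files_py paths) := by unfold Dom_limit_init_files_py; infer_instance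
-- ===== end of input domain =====

-- B replaces A's filter-then-stable-sort of init paths by a single bucketing pass keyed by depth
-- (sorting only the distinct depths); equivalence of the returned value is proved on all inputs.
-- The Python argument is a set; per the type convention it is the list of its distinct elements.

def pyMAX_INIT_FILES : Int := 20

-- ===== PORT A =====
def limit_init_files_py (paths : List String) : List String :=
  let init_files := PySem.List.sorted
    (paths.filter (fun p => PySem.Str.endswith p "__init__.py"))
    (fun p => PySem.Str.count p "/")
  let non_init := PySem.Set.ofList
    (paths.filter (fun p => !(PySem.Str.endswith p "__init__.py")))
  let limited_inits := PySem.Set.ofList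
    (PySem.List.slice init_files none (some pyMAX_INIT_FILES))
  PySem.Set.union non_init limited_inits

-- ===== PORT B =====
def limit_init_files_py_alt (paths : List String) : List String :=
  let st := paths.foldl
    (fun (st : PySem.Set String × PySem.Dict Nat (List String)) p =>
      if PySem.Str.endswith p "__init__.py" then
        (st.1, st.2.modify (PySem.Str.count p "/") [] (fun l => l ++ [p]))
      else (st.1.add p, st.2))
    (PySem.Set.empty, PySem.Dict.empty)
  let picked := (PySem.List.sorted st.2.keys (fun d => d)).foldl
    (fun acc d => acc ++ st.2.getD d []) []
  PySem.Set.union st.1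
    (PySem.Set.ofList (PySem.List.slice picked none (some pyMAX_INIT_FILES)))

-- ===== PRECONDITION & SPEC =====
def Spec_limit_init_files_py (paths : List String) (out : List String) : Prop := out = limit_init_files_py_alt paths
instance (paths : List String) (out : List String) : Decidable (Spec_limit_init_files_py paths out) := by unfold Spec_limit_init_files_py; infer_instance

-- ===== CLAIM (what is proved, stated in full; the proofs are below) =====
def Claim_equal_limit_init_files_py : Prop := ∀ (paths : List String), Dom_limit_init_files_py paths → Spec_limit_init_files_py paths (limit_init_files_py paths)

-- ===== LEMMAS AND PROOFS =====

-- insertBy passes over a prefix none of whose elements trigger `before`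
theorem pv_insertBy_append {α : Type} (before : α → α → Bool) (x : α) (l1 l2 : List α)
    (h : ∀ z ∈ l1, before x z = false) :
    PySem.List.insertBy before x (l1 ++ l2) = l1 ++ PySem.List.insertBy before x l2 := by
  induction l1 with
  | nil => simp
  | cons a t ih =>
    have ha : before x a = false := h a (by simp)
    simp [PySem.List.insertBy, ha, ih (fun z hz => h z (by simp [hz]))]

-- insertBy puts x in front when every element triggers `before`
theorem pv_insertBy_front {α : Type} (before : α → α → Bool) (x : α) (l : List α)
    (h : ∀ z ∈ l, before x z = true) :
    PySem.List.insertBy before x l = x :: l := by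
  cases l with
  | nil => simp [PySem.List.insertBy]
  | cons a t => simp [PySem.List.insertBy, h a (by simp)]

theorem pv_flatMap_congr {α β : Type} (l : List α) (f g : α → List β)
    (h : ∀ c ∈ l, f c = g c) : l.flatMap f = l.flatMap g := by
  induction l with
  | nil => rfl
  | cons a t ih =>
    simp [List.flatMap_cons, h a (by simp), ih (fun c hc => h c (by simp [hc]))]

theorem pv_filter_append_single {α κ : Type} [DecidableEq κ] (k : α → κ) (ys : List α) (x : α) (c : κ) :
    (ys ++ [x]).filter (fun y => k y == c)
      = ys.filter (fun y => k y == c) ++ (if k x = c then [x] else []) := by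
  simp [List.filter_append]
  split_ifs with h <;> simp [h]

theorem pv_insert_step {α κ : Type} [LinearOrder κ] [DecidableEq κ] (k : α → κ)
    (D : List κ) (hD : D.Pairwise (· < ·)) (x : α) (hx : k x ∈ D) (ys : List α) :
    PySem.List.insertBy (fun a b => decide (k a < k b)) x
        (D.flatMap (fun c => ys.filter (fun y => k y == c)))
      = D.flatMap (fun c => (ys ++ [x]).filter (fun y => k y == c)) := by
  induction D with
  | nil => cases hx
  | cons c D' ih =>
    have hcD' : ∀ c' ∈ D', c < c' := (List.pairwise_cons.mp hD).1
    have hD' : D'.Pairwise (· < ·) := (List.pairwise_cons.mp hD).2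
    by_cases hc : k x = c
    · -- x belongs to the head bucket; everything after has strictly larger key
      have htail : D'.flatMap (fun c' => (ys ++ [x]).filter (fun y => k y == c'))
          = D'.flatMap (fun c' => ys.filter (fun y => k y == c')) := by
        apply pv_flatMap_congr
        intro c' hc'
        rw [pv_filter_append_single]
        have hlt' : k x < c' := lt_of_le_of_lt (le_of_eq hc) (hcD' c' hc')
        simp [ne_of_lt hlt']
      have h1 : ∀ z ∈ ys.filter (fun y => k y == c),
          (fun a b => decide (k a < k b)) x z = false := by
        intro z hz
        have hz' : k z = c := by simpa using (List.mem_filter.mp hz).2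
        simp [hz', hc]
      have h2 : ∀ z ∈ D'.flatMap (fun c' => ys.filter (fun y => k y == c')),
          (fun a b => decide (k a < k b)) x z = true := by
        intro z hz
        rcases List.mem_flatMap.mp hz with ⟨c', hc', hzc⟩
        have hz' : k z = c' := by simpa using (List.mem_filter.mp hzc).2
        have : k x < c' := lt_of_le_of_lt (le_of_eq hc) (hcD' c' hc')
        simp [hz', this]
      rw [List.flatMap_cons, List.flatMap_cons, htail,
        pv_insertBy_append _ _ _ _ h1, pv_insertBy_front _ _ _ h2,
        pv_filter_append_single]
      simp [hc]
    · -- x lies in a later bucket: its key is strictly larger than c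
      have hxD' : k x ∈ D' := by
        rcases List.mem_cons.mp hx with h | h
        · exact absurd h hc
        · exact h
      have hlt : c < k x := hcD' _ hxD'
      have h1 : ∀ z ∈ ys.filter (fun y => k y == c),
          (fun a b => decide (k a < k b)) x z = false := by
        intro z hz
        have hz' : k z = c := by simpa using (List.mem_filter.mp hz).2
        have : ¬ (k x < k z) := by rw [hz']; exact fun hcon => lt_asymm hlt hcon
        simp [this]
      rw [List.flatMap_cons, List.flatMap_cons, pv_insertBy_append _ _ _ _ h1,
        ih hD' hxD', pv_filter_append_single]
      have hne : k x ≠ c := hc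
      simp [hne]

theorem pv_sorted_eq_flatMap {α κ : Type} [LinearOrder κ] [DecidableEq κ] (k : α → κ)
    (ys : List α) (D : List κ) (hD : D.Pairwise (· < ·)) (hmem : ∀ y ∈ ys, k y ∈ D) :
    PySem.List.sorted ys k = D.flatMap (fun c => ys.filter (fun y => k y == c)) := by
  induction ys using List.reverseRecOn with
  | nil =>
    have : D.flatMap (fun c => ([] : List α).filter (fun y => k y == c)) = [] := by simp
    simp [PySem.List.sorted]
  | append_singleton ys x ih =>
    have hys : ∀ y ∈ ys, k y ∈ D := fun y hy => hmem y (by simp [hy])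
    have hx : k x ∈ D := hmem x (by simp)
    rw [PySem.List.sorted_eq_foldl_insertBy, List.foldl_append, ← PySem.List.sorted_eq_foldl_insertBy,
      ih hys]
    simpa using pv_insert_step k D hD x hx ys

-- first occurrences: PySem.List.dedup over a snoc
theorem pv_dedup_append_single {κ : Type} [DecidableEq κ] (l : List κ) (x : κ) :
    PySem.List.dedup (l ++ [x])
      = if x ∈ l then PySem.List.dedup l else PySem.List.dedup l ++ [x] := by
  show PySem.Set.ofList (l ++ [x]) = _
  rw [PySem.Set.ofList, List.foldl_append]
  have : List.foldl PySem.Set.add PySem.Set.empty l = PySem.List.dedup l := rfl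
  rw [this]
  simp only [List.foldl_cons, List.foldl_nil, PySem.Set.add]
  by_cases hx : x ∈ l
  · have : PySem.Set.contains (PySem.List.dedup l) x = true := by
      simp [PySem.Set.contains, hx]
    simp [this, hx]
  · have : PySem.Set.contains (PySem.List.dedup l) x = false := by
      simp [PySem.Set.contains, hx]
    simp [this, hx]

theorem pv_find?_map_pair {κ ν : Type} [DecidableEq κ] (D : List κ) (v : κ → ν) (c : κ)
    (hnd : D.Nodup) (hc : c ∈ D) :
    (D.map (fun a => (a, v a))).find? (fun p => p.1 == c) = some (c, v c) := by
  induction D with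
  | nil => cases hc
  | cons a t ih =>
    by_cases hac : a = c
    · subst hac; simp [List.find?]
    · have hct : c ∈ t := by
        rcases List.mem_cons.mp hc with h | h
        · exact absurd h.symm hac
        · exact h
      simp only [List.map_cons, List.find?]
      have : ((a, v a).1 == c) = false := by simp [hac]
      rw [this]
      exact ih (List.nodup_cons.mp hnd).2 hct

theorem pv_find?_map_pair_none {κ ν : Type} [DecidableEq κ] (D : List κ) (v : κ → ν) (c : κ)
    (hc : c ∉ D) :
    (D.map (fun a => (a, v a))).find? (fun p => p.1 == c) = none := by
  induction D with
  | nil => rfl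
  | cons a t ih =>
    simp only [List.map_cons, List.find?]
    have hac : a ≠ c := fun h => hc (by simp [h])
    have : ((a, v a).1 == c) = false := by simp [hac]
    rw [this]
    exact ih (fun h => hc (by simp [h]))

-- the dict built by B's loop, described in closed form
theorem pv_dict_items {α κ : Type} [DecidableEq κ] (k : α → κ) (ys : List α) :
    (ys.foldl (fun d y => PySem.Dict.modify d (k y) [] (fun l => l ++ [y]))
        (PySem.Dict.empty : PySem.Dict κ (List α))).items
      = (PySem.List.dedup (ys.map k)).map
          (fun c => (c, ys.filter (fun y => k y == c))) := by
  induction ys using List.reverseRecOn with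
  | nil => simp [PySem.Dict.empty, PySem.List.dedup, PySem.Set.ofList, PySem.Set.empty]
  | append_singleton ys x ih =>
    rw [List.foldl_append, List.foldl_cons, List.foldl_nil]
    set d := ys.foldl (fun d y => PySem.Dict.modify d (k y) [] (fun l => l ++ [y]))
        (PySem.Dict.empty : PySem.Dict κ (List α)) with hd
    set D := PySem.List.dedup (ys.map k) with hD
    have hnd : D.Nodup := PySem.List.nodup_dedup _
    have hmemD : ∀ c, c ∈ D ↔ c ∈ ys.map k := fun c => PySem.List.mem_dedup _ c
    have hmap : List.map k (ys ++ [x]) = List.map k ys ++ [k x] := by simp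
    by_cases hx : k x ∈ ys.map k
    · have hxD : k x ∈ D := (hmemD _).mpr hx
      have hget : d.get? (k x) = some (ys.filter (fun y => k y == k x)) := by
        simp only [PySem.Dict.get?, ih]
        rw [pv_find?_map_pair D _ (k x) hnd hxD]
        rfl
      have hcont : d.contains (k x) = true := by
        rw [PySem.Dict.contains_eq_isSome_get?, hget]; rfl
      rw [PySem.Dict.modify, PySem.Dict.getD, hget, Option.getD_some, hmap,
        pv_dedup_append_single, if_pos hx, ← hD, PySem.Dict.insert]
      rw [if_pos hcont]
      rw [ih, List.map_map]
      apply List.map_congr_left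
      intro a _
      by_cases hac : a = k x
      · subst hac
        simp [pv_filter_append_single]
      · have hb : (a == k x) = false := by simp [hac]
        have hne : k x ≠ a := fun h => hac h.symm
        simp only [Function.comp_apply, hb, Bool.false_eq_true, if_false]
        rw [pv_filter_append_single]
        simp [hne]
    · have hxD : k x ∉ D := fun h => hx ((hmemD _).mp h)
      have hget : d.get? (k x) = none := by
        simp only [PySem.Dict.get?, ih]
        rw [pv_find?_map_pair_none D _ (k x) hxD]
        rfl
      have hcont : d.contains (k x) = false := by
        rw [PySem.Dict.contains_eq_isSome_get?, hget]; rfl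
      rw [PySem.Dict.modify, PySem.Dict.getD, hget, Option.getD_none, hmap,
        pv_dedup_append_single, if_neg hx, ← hD, PySem.Dict.insert]
      rw [if_neg (by simp [hcont])]
      rw [ih, List.map_append, List.map_cons, List.map_nil]
      simp only [PySem.Dict.mk.injEq]
      congr 1
      · apply List.map_congr_left
        intro a ha
        have hne : k x ≠ a := fun h => hx (h ▸ (hmemD a).mp ha)
        rw [pv_filter_append_single]
        simp [hne]
      · have hfe : ys.filter (fun y => k y == k x) = [] := by
          rw [List.filter_eq_nil_iff]
          intro y hy hky
          have hky' : k y = k x := by simpa using hky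
          exact hx (hky' ▸ List.mem_map.mpr ⟨y, hy, rfl⟩)
        rw [pv_filter_append_single]
        simp [hfe]

-- B's first loop splits into the set fold and the dict fold over the selected paths
theorem pv_fold_split {a k : Type} [BEq a] [BEq k] (e : a -> Bool) (key : a -> k)
    (paths : List a) (s : PySem.Set a) (d : PySem.Dict k (List a)) :
    paths.foldl
        (fun (st : PySem.Set a × PySem.Dict k (List a)) p =>
          if e p then (st.1, st.2.modify (key p) [] (fun l => l ++ [p]))
          else (st.1.add p, st.2)) (s, d)
      = ((paths.filter (fun p => !(e p))).foldl PySem.Set.add s,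
         (paths.filter e).foldl
           (fun d p => d.modify (key p) [] (fun l => l ++ [p])) d) := by
  induction paths generalizing s d with
  | nil => rfl
  | cons p t ih =>
    cases hp : e p <;> simp [List.filter_cons, hp, ih]

-- ===== VERDICT (by name: the statement is the Claim_ definition above) =====
theorem limit_init_files_py_spec : Claim_equal_limit_init_files_py := by
  intro paths _
  unfold Spec_limit_init_files_py limit_init_files_py limit_init_files_py_alt
  rw [pv_fold_split (fun p => PySem.Str.endswith p "__init__.py")
      (fun p => PySem.Str.count p "/")]
  set e := fun p => PySem.Str.endswith p "__init__.py" with he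
  set k := fun p => PySem.Str.count p "/" with hk
  set ys := paths.filter e with hys
  set d := ys.foldl (fun d p => PySem.Dict.modify d (k p) [] (fun l => l ++ [p]))
      (PySem.Dict.empty : PySem.Dict Nat (List String)) with hd
  set D := PySem.List.dedup (ys.map k) with hD
  have hitems : d.items = D.map (fun c => (c, ys.filter (fun y => k y == c))) :=
    pv_dict_items k ys
  have hkeys : d.keys = D := by
    simp [PySem.Dict.keys, hitems, List.map_map, Function.comp_def]
  have hnd : D.Nodup := PySem.List.nodup_dedup _
  have hsortedD : (PySem.List.sorted D (fun c => c)).Pairwise (· < ·) := by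
    rw [hD]
    exact PySem.List.sorted_ofList_pairwise_lt (ys.map k)
  have hmem : ∀ y ∈ ys, k y ∈ PySem.List.sorted D (fun c => c) := by
    intro y hy
    rw [PySem.List.mem_sorted, hD, PySem.List.mem_dedup]
    exact List.mem_map.mpr ⟨y, hy, rfl⟩
  have hpick : (PySem.List.sorted d.keys (fun c => c)).foldl
      (fun acc c => acc ++ d.getD c []) []
      = PySem.List.sorted ys k := by
    rw [hkeys, PySem.List.foldl_append_eq_flatMap, List.nil_append]
    rw [pv_sorted_eq_flatMap k ys (PySem.List.sorted D (fun c => c)) hsortedD hmem]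
    apply pv_flatMap_congr
    intro c hc
    have hcD : c ∈ D := by rwa [PySem.List.mem_sorted] at hc
    simp only [PySem.Dict.getD, PySem.Dict.get?, hitems]
    rw [pv_find?_map_pair D _ c hnd hcD]
    rfl
  show PySem.Set.union (PySem.Set.ofList (paths.filter (fun p => !(e p))))
      (PySem.Set.ofList (PySem.List.slice (PySem.List.sorted ys k) none (some pyMAX_INIT_FILES)))
    = PySem.Set.union (PySem.Set.ofList (paths.filter (fun p => !(e p))))
      (PySem.Set.ofList (PySem.List.slice
        ((PySem.List.sorted d.keys (fun c => c)).foldl (fun acc c => acc ++ d.getD c []) [])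
        none (some pyMAX_INIT_FILES)))
  rw [hpick]
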